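-- pv_equiv track=rewrite | github.com/uqxzp/chem_mat_data | chem_mat_data/data.py | _split_file_into_molecules
-- ===== SOURCE A (Python) =====
-- from typing import Dict, List, Tuple, Union, Optional, Any, Generator
--
-- def _split_file_into_molecules(content: str) -> List[str]:
--     """
--     Split the HOPV15 file content into individual molecule chunks.
--
--     This is the first step of the 2-step parsing approach.
--
--     :param content: The complete file content as a string
--     :returns: List of strings, each containing one molecule's data
--     """
--     lines = content.split('\n')
--     molecule_chunks = []
--     current_chunk_lines = []
--     in_qchem_section = False
--     qchem_count = 0
--
--     for i, line in enumerate(lines):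
--         line = line.strip()
--
--         # Skip empty lines at the start of a potential new molecule
--         if not line and not current_chunk_lines:
--             continue
--
--         current_chunk_lines.append(line)
--
--         # Track QChem sections to identify molecule boundaries
--         if line.startswith('QChem '):
--             in_qchem_section = True
--             qchem_count += 1
--
--         # After being in a QChem section, if we encounter a line that looks like a new SMILES
--         # and we've seen some QChem data, this is likely a new molecule
--         elif in_qchem_section and qchem_count >= 1:
--             # Check if this line looks like a SMILES string starting a new molecule
--             # A SMILES line is likely if:
--             # - It's not empty
--             # - It doesn't start with known keywords (InChI, QChem, Conformer)
--             # - It's not a number-only line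
--             # - It contains organic chemistry patterns (carbon atoms, bonds like =)
--             # - It contains typical SMILES characters
--             is_not_keyword = (not line.startswith('InChI=') and
--                              not line.startswith('QChem ') and
--                              not line.startswith('Conformer '))
--             is_not_number = not line.replace('.', '').replace(',', '').replace('-', '').replace('nan', '').replace(' ', '').isdigit()
--             has_organic_patterns = ('c' in line.lower() or 'C' in line)
--             has_smiles_chars = ('=' in line or '(' in line or '[' in line or '#' in line)
--
--             if (is_not_keyword and is_not_number and has_organic_patterns and has_smiles_chars and len(line) >= 5):
--                 # This is likely the start of a new molecule
--                 # Remove this line from current chunk and save the current chunk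
--                 current_chunk_lines.pop()
--
--                 if current_chunk_lines:
--                     molecule_content = '\n'.join(current_chunk_lines)
--                     if molecule_content.strip():
--                         molecule_chunks.append(molecule_content)
--
--                 # Start new chunk with this line
--                 current_chunk_lines = [line]
--                 in_qchem_section = False
--                 qchem_count = 0
--
--     # Add the last chunk if it exists
--     if current_chunk_lines:
--         molecule_content = '\n'.join(current_chunk_lines)
--         if molecule_content.strip():
--             molecule_chunks.append(molecule_content)
--
--     return molecule_chunks
-- ===== SOURCE B (Python) =====
-- def _looks_like_new_smiles(line):
--     is_not_keyword = (not line.startswith('InChI=') and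
--                       not line.startswith('QChem ') and
--                       not line.startswith('Conformer '))
--     is_not_number = not line.replace('.', '').replace(',', '').replace('-', '').replace('nan', '').replace(' ', '').isdigit()
--     has_organic_patterns = ('c' in line.lower() or 'C' in line)
--     has_smiles_chars = ('=' in line or '(' in line or '[' in line or '#' in line)
--     return (is_not_keyword and is_not_number and has_organic_patterns
--             and has_smiles_chars and len(line) >= 5)
--
--
-- def _split_file_into_molecules(content):
--     lines = [l.strip() for l in content.split('\n')]
--     # phase 1: mark the lines that start a new molecule
--     flags = []
--     in_qchem = False
--     for line in lines:
--         boundary = in_qchem and _looks_like_new_smiles(line)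
--         flags.append(boundary)
--         if line.startswith('QChem '):
--             in_qchem = True
--         elif boundary:
--             in_qchem = False
--     # phase 2: cut the line list at the marked positions
--     segments = [[]]
--     for line, boundary in zip(lines, flags):
--         if boundary:
--             segments.append([])
--         segments[-1].append(line)
--     # phase 3: drop leading empty lines, join, keep non-blank chunks
--     chunks = []
--     for seg in segments:
--         while seg and not seg[0]:
--             seg.pop(0)
--         text = '\n'.join(seg)
--         if text.strip():
--             chunks.append(text)
--     return chunks
-- ===== Notes on version B (the rewrite author's own statement) =====
-- stated objective: alternative
-- what changed: A's single stateful loop that pops the boundary line, emits and resets the running chunk inline is replaced by three simple passes: mark each line with a boundary flag, cut the stripped-line list into segments at the flagged lines, then clean (drop leading empties) and join each segment.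
import Mathlib
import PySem

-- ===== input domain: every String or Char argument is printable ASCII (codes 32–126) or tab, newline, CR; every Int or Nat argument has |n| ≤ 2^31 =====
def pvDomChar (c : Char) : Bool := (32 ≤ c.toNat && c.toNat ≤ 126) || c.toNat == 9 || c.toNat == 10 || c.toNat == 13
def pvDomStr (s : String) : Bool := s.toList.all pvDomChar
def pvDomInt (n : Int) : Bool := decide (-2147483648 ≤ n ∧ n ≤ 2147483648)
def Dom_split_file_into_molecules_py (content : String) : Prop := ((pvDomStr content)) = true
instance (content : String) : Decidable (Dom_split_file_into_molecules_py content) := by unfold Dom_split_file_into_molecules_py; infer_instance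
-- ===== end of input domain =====

-- B replaces A's single stateful emit-and-reset loop by three simple passes (mark boundary lines,
-- cut the line list at them, clean and join each segment); objective: alternative decomposition.

-- ===== PORT A =====
-- loop body of A's for-loop (state = (molecule_chunks, current_chunk_lines, in_qchem_section, qchem_count))
def aStep (st : List String × List String × Bool × Int) (rawline : String) :
    List String × List String × Bool × Int :=
  let chunks := st.1; let cur := st.2.1; let inq := st.2.2.1; let cnt := st.2.2.2
  let line := PySem.Str.strip rawline
  if line == "" && cur.isEmpty then st
  else
    let cur := cur ++ [line]
    if PySem.Str.startswith line "QChem " then (chunks, cur, true, cnt + 1)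
    else if inq && decide (1 ≤ cnt) then
      let is_not_keyword := !PySem.Str.startswith line "InChI=" &&
                            !PySem.Str.startswith line "QChem " &&
                            !PySem.Str.startswith line "Conformer "
      let is_not_number := !PySem.Str.strIsdigit (PySem.Str.replace (PySem.Str.replace
            (PySem.Str.replace (PySem.Str.replace (PySem.Str.replace line "." "") "," "") "-" "")
            "nan" "") " " "")
      let has_organic_patterns := PySem.Str.isIn "c" (PySem.Str.lower line) || PySem.Str.isIn "C" line
      let has_smiles_chars := PySem.Str.isIn "=" line || PySem.Str.isIn "(" line ||
                              PySem.Str.isIn "[" line || PySem.Str.isIn "#" line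
      if is_not_keyword && is_not_number && has_organic_patterns && has_smiles_chars &&
          decide (5 ≤ PySem.Str.len line) then
        let cur := cur.dropLast   -- current_chunk_lines.pop() removes the just-appended line
        let chunks :=
          if cur ≠ [] then
            let mc := PySem.Str.join "\n" cur
            if PySem.Str.strip mc ≠ "" then chunks ++ [mc] else chunks
          else chunks
        (chunks, [line], false, 0)
      else (chunks, cur, inq, cnt)
    else (chunks, cur, inq, cnt)

-- the trailing "add the last chunk" block
def aFinish (st : List String × List String × Bool × Int) : List String :=
  if st.2.1 ≠ [] then
    let mc := PySem.Str.join "\n" st.2.1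
    if PySem.Str.strip mc ≠ "" then st.1 ++ [mc] else st.1
  else st.1

def split_file_into_molecules_py (content : String) : List String :=
  let lines := (PySem.Str.split? content "\n").getD []  -- sep ≠ "", so split? is always some
  aFinish (lines.foldl aStep ([], [], false, 0))

-- ===== PORT B =====
def looksLikeNewSmiles (line : String) : Bool :=
  let is_not_keyword := !PySem.Str.startswith line "InChI=" &&
                        !PySem.Str.startswith line "QChem " &&
                        !PySem.Str.startswith line "Conformer "
  let is_not_number := !PySem.Str.strIsdigit (PySem.Str.replace (PySem.Str.replace
        (PySem.Str.replace (PySem.Str.replace (PySem.Str.replace line "." "") "," "") "-" "")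
        "nan" "") " " "")
  let has_organic_patterns := PySem.Str.isIn "c" (PySem.Str.lower line) || PySem.Str.isIn "C" line
  let has_smiles_chars := PySem.Str.isIn "=" line || PySem.Str.isIn "(" line ||
                          PySem.Str.isIn "[" line || PySem.Str.isIn "#" line
  is_not_keyword && is_not_number && has_organic_patterns && has_smiles_chars &&
    decide (5 ≤ PySem.Str.len line)

-- phase 1: the boundary flag of each line
def boundaryFlags : List String → Bool → List Bool
  | [], _ => []
  | line :: ls, in_qchem =>
    let boundary := in_qchem && looksLikeNewSmiles line
    boundary :: boundaryFlags ls
      (if PySem.Str.startswith line "QChem " then true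
       else if boundary then false else in_qchem)

-- phase 2 loop body: open a new segment at a boundary, append the line to the last segment
def bCut (segs : List (List String)) (p : String × Bool) : List (List String) :=
  let segs := if p.2 then segs ++ [[]] else segs
  segs.dropLast ++ [segs.getLastD [] ++ [p.1]]

-- phase 3 loop body: drop leading empty lines, join, keep if non-blank
def bJoin (chunks : List String) (seg : List String) : List String :=
  let seg := seg.dropWhile (fun l => l == "")
  let text := PySem.Str.join "\n" seg
  if PySem.Str.strip text ≠ "" then chunks ++ [text] else chunks

def split_file_into_molecules_py_alt (content : String) : List String :=
  let lines := ((PySem.Str.split? content "\n").getD []).map PySem.Str.strip  -- sep ≠ "", so split? is always some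
  let flags := boundaryFlags lines false
  let segments := (lines.zip flags).foldl bCut [[]]
  segments.foldl bJoin []

-- ===== PRECONDITION & SPEC =====
def Spec_split_file_into_molecules_py (content : String) (out : List String) : Prop := out = split_file_into_molecules_py_alt content
instance (content : String) (out : List String) : Decidable (Spec_split_file_into_molecules_py content out) := by unfold Spec_split_file_into_molecules_py; infer_instance

-- ===== CLAIM (what is proved, stated in full; the proofs are below) =====
def Claim_equal_split_file_into_molecules_py : Prop := ∀ (content : String), Dom_split_file_into_molecules_py content → Spec_split_file_into_molecules_py content (split_file_into_molecules_py content)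

-- ===== LEMMAS AND PROOFS =====

-- emit one chunk: the joined text, if non-blank
def pvEmit (cur : List String) : List String :=
  let text := PySem.Str.join "\n" cur
  if PySem.Str.strip text ≠ "" then [text] else []

-- common reference recursion over the STRIPPED lines (state = in_qchem flag and current chunk)
def pvGo : List String → Bool → List String → List String
  | [], _, cur => pvEmit cur
  | line :: ls, inq, cur =>
    if line == "" && cur.isEmpty then pvGo ls inq cur
    else if PySem.Str.startswith line "QChem " then pvGo ls true (cur ++ [line])
    else if inq && looksLikeNewSmiles line then pvEmit cur ++ pvGo ls false [line]
    else pvGo ls inq (cur ++ [line])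

-- per-segment cleanup of B's third pass
def pvClean (seg : List String) : List String := pvEmit (seg.dropWhile (fun l => l == ""))

lemma pvEmit_nil : pvEmit [] = [] := by decide

lemma looks_ne_empty {line : String} (h : looksLikeNewSmiles line = true) : (line == "") = false := by
  rcases eq_or_ne line "" with rfl | h'
  · exact absurd h (by decide)
  · simpa using h'

lemma looks_not_qchem {line : String} (h : looksLikeNewSmiles line = true) :
    PySem.Str.startswith line "QChem " = false := by
  simp only [looksLikeNewSmiles, Bool.and_eq_true, Bool.not_eq_eq_eq_not, Bool.not_true] at h
  exact h.1.1.1.1.1.2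

lemma qchem_ne_empty {line : String} (h : PySem.Str.startswith line "QChem " = true) :
    (line == "") = false := by
  rcases eq_or_ne line "" with rfl | h'
  · exact absurd h (by decide)
  · simpa using h'

lemma aFinish_eq (st : List String × List String × Bool × Int) :
    aFinish st = st.1 ++ pvEmit st.2.1 := by
  obtain ⟨chunks, cur, inq, cnt⟩ := st
  by_cases hc : cur = []
  · subst hc; simp [aFinish, pvEmit_nil]
  · simp only [aFinish, pvEmit]
    split_ifs with h1 h2 <;> simp_all

lemma emit_if (chunks cur : List String) :
    (if cur ≠ [] then
       (if PySem.Str.strip (PySem.Str.join "\n" cur) ≠ "" then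
         chunks ++ [PySem.Str.join "\n" cur] else chunks)
     else chunks) = chunks ++ pvEmit cur := by
  by_cases hc : cur = []
  · subst hc; rw [if_neg (by simp), pvEmit_nil, List.append_nil]
  · rw [if_pos hc]
    simp only [pvEmit]
    split_ifs <;> simp

lemma aStep_eq (chunks cur : List String) (inq : Bool) (cnt : Int) (raw : String) :
    aStep (chunks, cur, inq, cnt) raw =
      (if PySem.Str.strip raw == "" && cur.isEmpty then (chunks, cur, inq, cnt)
       else if PySem.Str.startswith (PySem.Str.strip raw) "QChem " then
         (chunks, cur ++ [PySem.Str.strip raw], true, cnt + 1)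
       else if inq && decide (1 ≤ cnt) then
         (if looksLikeNewSmiles (PySem.Str.strip raw) then
            (chunks ++ pvEmit cur, [PySem.Str.strip raw], false, (0 : Int))
          else (chunks, cur ++ [PySem.Str.strip raw], inq, cnt))
       else (chunks, cur ++ [PySem.Str.strip raw], inq, cnt)) := by
  rw [show aStep (chunks, cur, inq, cnt) raw =
      (if PySem.Str.strip raw == "" && cur.isEmpty then (chunks, cur, inq, cnt)
       else if PySem.Str.startswith (PySem.Str.strip raw) "QChem " then
         (chunks, cur ++ [PySem.Str.strip raw], true, cnt + 1)
       else if inq && decide (1 ≤ cnt) then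
         (if looksLikeNewSmiles (PySem.Str.strip raw) then
            ((if (cur ++ [PySem.Str.strip raw]).dropLast ≠ [] then
                (if PySem.Str.strip (PySem.Str.join "\n" ((cur ++ [PySem.Str.strip raw]).dropLast)) ≠ "" then
                  chunks ++ [PySem.Str.join "\n" ((cur ++ [PySem.Str.strip raw]).dropLast)] else chunks)
              else chunks), [PySem.Str.strip raw], false, (0 : Int))
          else (chunks, cur ++ [PySem.Str.strip raw], inq, cnt))
       else (chunks, cur ++ [PySem.Str.strip raw], inq, cnt)) from rfl]
  rw [List.dropLast_concat, emit_if]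

lemma foldA (ls : List String) : ∀ (chunks cur : List String) (inq : Bool) (cnt : Int),
    0 ≤ cnt → (inq = true → 1 ≤ cnt) →
    aFinish (ls.foldl aStep (chunks, cur, inq, cnt)) =
      chunks ++ pvGo (ls.map PySem.Str.strip) inq cur := by
  induction ls with
  | nil =>
    intro chunks cur inq cnt _ _
    simpa [pvGo] using aFinish_eq (chunks, cur, inq, cnt)
  | cons raw ls ih =>
    intro chunks cur inq cnt h0 h1
    simp only [List.foldl_cons, List.map_cons]
    rw [aStep_eq, pvGo]
    by_cases hskip : (PySem.Str.strip raw == "" && cur.isEmpty) = true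
    · rw [if_pos hskip, if_pos hskip, ih chunks cur inq cnt h0 h1]
    · rw [if_neg hskip, if_neg hskip]
      by_cases hq : PySem.Str.startswith (PySem.Str.strip raw) "QChem " = true
      · rw [if_pos hq, if_pos hq,
            ih chunks (cur ++ [PySem.Str.strip raw]) true (cnt + 1) (by omega) (fun _ => by omega)]
      · rw [if_neg hq, if_neg hq]
        by_cases h3 : (inq && decide (1 ≤ cnt)) = true
        · have hinq : inq = true := by revert h3; cases inq <;> simp
          rw [if_pos h3]
          by_cases h4 : looksLikeNewSmiles (PySem.Str.strip raw) = true
          · rw [if_pos h4, if_pos (show (inq && looksLikeNewSmiles (PySem.Str.strip raw)) = true by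
                rw [hinq, h4]; rfl),
              ih (chunks ++ pvEmit cur) [PySem.Str.strip raw] false 0 le_rfl (by simp),
              List.append_assoc]
          · rw [if_neg h4, if_neg (show ¬ (inq && looksLikeNewSmiles (PySem.Str.strip raw)) = true by
                simp only [Bool.and_eq_true, not_and]; intro _ hc; exact h4 hc),
              ih chunks (cur ++ [PySem.Str.strip raw]) inq cnt h0 h1]
        · have hinq : inq = false := by
            cases hi : inq
            · rfl
            · exact absurd (by rw [hi]; simpa using h1 hi) h3
          rw [if_neg h3, if_neg (by rw [hinq]; simp),
              ih chunks (cur ++ [PySem.Str.strip raw]) inq cnt h0 h1]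

lemma bJoin_eq : bJoin = fun chunks seg => chunks ++ pvClean seg := by
  funext chunks seg
  simp only [bJoin, pvClean, pvEmit]
  split_ifs <;> simp_all

lemma dropWhile_concat_ne (opn : List String) {line : String} (h : (line == "") = false) :
    List.dropWhile (fun l => l == "") (opn ++ [line]) =
      List.dropWhile (fun l => l == "") opn ++ [line] := by
  rw [List.dropWhile_append]
  split_ifs with he
  · rw [List.isEmpty_iff.mp he, List.nil_append, List.dropWhile_cons, h]; rfl
  · rfl

lemma foldB (ls : List String) : ∀ (inq : Bool) (done : List (List String)) (opn : List String),
    ((ls.zip (boundaryFlags ls inq)).foldl bCut (done ++ [opn])).flatMap pvClean =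
      done.flatMap pvClean ++ pvGo ls inq (opn.dropWhile (fun l => l == "")) := by
  induction ls with
  | nil =>
    intro inq done opn
    simp [pvGo, pvClean, List.flatMap_append]
  | cons line ls ih =>
    intro inq done opn
    simp only [boundaryFlags, List.zip_cons_cons, List.foldl_cons]
    rw [pvGo]
    cases hb : (inq && looksLikeNewSmiles line) with
    | true =>
      have h' : inq = true ∧ looksLikeNewSmiles line = true := by simpa using hb
      have hne := looks_ne_empty h'.2
      have hq := looks_not_qchem h'.2
      have hcut : bCut (done ++ [opn]) (line, true) =
          (done ++ [opn]) ++ [[line]] := by simp [bCut]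
      rw [hcut]
      simp only [hne, hq, Bool.false_and, Bool.false_eq_true, if_false, if_true]
      rw [ih false (done ++ [opn]) [line]]
      have hdw : List.dropWhile (fun l => l == "") [line] = [line] := by
        rw [List.dropWhile_cons, hne]; rfl
      rw [hdw]
      simp [List.flatMap_append, pvClean]
    | false =>
      have hcut : bCut (done ++ [opn]) (line, false) =
          done ++ [opn ++ [line]] := by simp [bCut]
      rw [hcut]
      simp only [Bool.false_eq_true, if_false]
      cases hq : PySem.Str.startswith line "QChem " with
      | true =>
        have hne := qchem_ne_empty hq
        simp only [hne, if_true, Bool.false_and, Bool.false_eq_true, if_false]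
        rw [ih true done (opn ++ [line]), dropWhile_concat_ne opn hne]
      | false =>
        simp only [Bool.false_eq_true, if_false]
        rw [ih inq done (opn ++ [line])]
        cases hskip : (line == "" && (List.dropWhile (fun l => l == "") opn).isEmpty) with
        | true =>
          have h' : (line == "") = true ∧
              (List.dropWhile (fun l => l == "") opn).isEmpty = true := by simpa using hskip
          rw [if_pos rfl]
          have hdw : List.dropWhile (fun l => l == "") (opn ++ [line]) =
              List.dropWhile (fun l => l == "") opn := by
            rw [List.dropWhile_append, if_pos h'.2, List.isEmpty_iff.mp h'.2,
                List.dropWhile_cons, h'.1]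
            rfl
          rw [hdw]
        | false =>
          simp only [Bool.false_eq_true, if_false]
          have hdw : List.dropWhile (fun l => l == "") (opn ++ [line]) =
              List.dropWhile (fun l => l == "") opn ++ [line] := by
            rcases Bool.and_eq_false_iff.mp hskip with he | hem
            · exact dropWhile_concat_ne opn he
            · rw [List.dropWhile_append, if_neg (by rw [hem]; simp)]
          rw [hdw]

-- ===== VERDICT (by name: the statement is the Claim_ definition above) =====
theorem split_file_into_molecules_py_spec : Claim_equal_split_file_into_molecules_py := by
  intro content _
  show _ = _
  unfold split_file_into_molecules_py split_file_into_molecules_py_alt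
  rw [foldA _ [] [] false 0 le_rfl (by simp), bJoin_eq,
      PySem.List.foldl_append_eq_flatMap,
      show ([[]] : List (List String)) = [] ++ [[]] from rfl,
      foldB]
  simp
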